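-- pv_equiv track=rewrite | github.com/tabiya-tech/compass | backend/app/agent/penalty.py | get_penalty
-- ===== SOURCE A (Python) =====
-- _cached_penalties: list[int] = [2 ** i for i in range(16)]  # Cache levels 0-15 initially
--
-- def get_penalty(level: int) -> float:
--     """
--     Calculate the penalty associated with a given severity level.
--
--     The penalty increases geometrically according to 2^level, where higher levels
--     represent more severe errors. This structure ensures that a single higher-severity
--     error is penalized more heavily than the cumulative penalties of multiple lower-severity errors.
--
--     :param level:  The severity level of the error (0, 1, 2, ...).
--     :return: The penalty associated with the given severity level.
--     :raises ValueError: If the level is negative.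
--     """
--     if level < 0:
--         raise ValueError("Severity level must be non-negative.")
--     if level > 64:
--         raise ValueError("Severity level must be less than or equal to 64.")
--     if level >= len(_cached_penalties):
--         # Extend the cached penalties list if the level exceeds the cached range
--         _cached_penalties.extend(2 ** i for i in range(len(_cached_penalties), level + 1))
--
--     return _cached_penalties[level]
-- ===== SOURCE B (Python) =====
-- def get_penalty(level: int) -> float:
--     """Compute the penalty 2**level directly; no cache table is maintained."""
--     if level < 0:
--         raise ValueError("Severity level must be non-negative.")
--     if level > 64:
--         raise ValueError("Severity level must be less than or equal to 64.")
--     return 2 ** level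
-- ===== Notes on version B (the rewrite author's own statement) =====
-- stated objective: simpler
-- what changed: B drops the module-level cache list and the lazy-extend/index control flow, returning 2 ** level directly with the same two guards.
import Mathlib
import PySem

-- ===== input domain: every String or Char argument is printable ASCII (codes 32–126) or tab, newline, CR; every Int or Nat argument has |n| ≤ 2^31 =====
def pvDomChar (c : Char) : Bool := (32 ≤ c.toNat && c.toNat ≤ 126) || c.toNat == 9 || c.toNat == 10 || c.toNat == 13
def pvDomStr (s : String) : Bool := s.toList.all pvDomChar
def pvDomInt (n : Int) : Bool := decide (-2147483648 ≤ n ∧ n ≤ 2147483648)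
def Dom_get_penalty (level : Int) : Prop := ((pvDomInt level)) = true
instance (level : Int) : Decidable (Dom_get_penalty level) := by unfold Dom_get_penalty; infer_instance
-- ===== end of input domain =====

-- B replaces A's cached-list lookup with a direct 2**level; equivalence is about the return value (A also mutates its module-level cache).
-- ===== PORT A =====
def get_penalty (level : Int) : Int :=
  let cache : List Int := (PySem.List.pyRange 0 16 1).map (fun i => 2 ^ i.toNat)
  let cache :=
    if (cache.length : Int) ≤ level then
      cache ++ (PySem.List.pyRange (cache.length : Int) (level + 1) 1).map (fun i => 2 ^ i.toNat)
    else cache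
  PySem.List.pyGetD cache level 0

-- ===== PORT B =====
def get_penalty_alt (level : Int) : Int := 2 ^ level.toNat

-- ===== PRECONDITION & SPEC =====
-- Pre_ excludes exactly the inputs where A raises ValueError (level < 0 or level > 64); B raises the same errors there.
def Pre_get_penalty (level : Int) : Prop := 0 ≤ level ∧ level ≤ 64
instance (level : Int) : Decidable (Pre_get_penalty level) := by unfold Pre_get_penalty; infer_instance
def pvWitness_get_penalty : Int := (3)
def Spec_get_penalty (level : Int) (out : Int) : Prop := out = get_penalty_alt level
instance (level : Int) (out : Int) : Decidable (Spec_get_penalty level out) := by unfold Spec_get_penalty; infer_instance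

-- ===== CLAIM (what is proved, stated in full; the proofs are below) =====
def Claim_equal_get_penalty : Prop := ∀ (level : Int), Dom_get_penalty level → Pre_get_penalty level → Spec_get_penalty level (get_penalty level)

-- ===== LEMMAS AND PROOFS =====

-- ===== VERDICT (by name: the statement is the Claim_ definition above) =====
theorem get_penalty_spec : Claim_equal_get_penalty := by
  intro level _ hpre
  obtain ⟨h0, h64⟩ := hpre
  unfold Spec_get_penalty get_penalty get_penalty_alt
  have hlen : (((PySem.List.pyRange 0 16 1).map (fun i => (2:Int) ^ i.toNat)).length : Int) = 16 := by
    simp [PySem.List.length_pyRange_one]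
  dsimp only
  rw [hlen]
  split_ifs with h16
  · rw [← List.map_append,
        ← PySem.List.pyRange_one_append 0 16 (level + 1) (by omega) (by omega),
        PySem.List.pyGetD_map_pyRange_of_nonneg _ _ _ _ h0 (by omega)]
  · rw [PySem.List.pyGetD_map_pyRange_of_nonneg _ _ _ _ h0 (by omega)]
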